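-- pv_equiv track=rewrite | github.com/retracesoftware/retracesoftware | src/retracesoftware/protocol/replay.py | _first_stack_difference
-- ===== SOURCE A (Python) =====
-- def _first_stack_difference(recorded, replay):
--     limit = min(len(recorded), len(replay))
--     for index in range(limit):
--         if recorded[index] != replay[index]:
--             return index, recorded[index], replay[index]
--     if len(recorded) != len(replay):
--         return limit, (
--             recorded[limit] if limit < len(recorded) else None
--         ), (
--             replay[limit] if limit < len(replay) else None
--         )
--     return None, None, None
-- ===== SOURCE B (Python) =====
-- def _first_stack_difference(recorded, replay):
--     # Binary search for the longest common prefix: recorded[:m] == replay[:m]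
--     # is a monotone predicate, so the maximal such k is found in O(log n)
--     # slice comparisons, then one lookup decides the answer.
--     lo, hi = 0, min(len(recorded), len(replay))
--     while lo < hi:
--         mid = (lo + hi + 1) // 2
--         if recorded[:mid] == replay[:mid]:
--             lo = mid
--         else:
--             hi = mid - 1
--     k = lo
--     if k == len(recorded) and k == len(replay):
--         return None, None, None
--     return k, (recorded[k] if k < len(recorded) else None), (replay[k] if k < len(replay) else None)
-- ===== Notes on version B (the rewrite author's own statement) =====
-- stated objective: alternative
-- what changed: Replaced A's linear index scan plus length-difference tail branch by a binary search over the monotone predicate 'the length-m prefixes are equal', finding the longest common prefix length k in O(log n) slice comparisons and answering with one lookup at k.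
import Mathlib
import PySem

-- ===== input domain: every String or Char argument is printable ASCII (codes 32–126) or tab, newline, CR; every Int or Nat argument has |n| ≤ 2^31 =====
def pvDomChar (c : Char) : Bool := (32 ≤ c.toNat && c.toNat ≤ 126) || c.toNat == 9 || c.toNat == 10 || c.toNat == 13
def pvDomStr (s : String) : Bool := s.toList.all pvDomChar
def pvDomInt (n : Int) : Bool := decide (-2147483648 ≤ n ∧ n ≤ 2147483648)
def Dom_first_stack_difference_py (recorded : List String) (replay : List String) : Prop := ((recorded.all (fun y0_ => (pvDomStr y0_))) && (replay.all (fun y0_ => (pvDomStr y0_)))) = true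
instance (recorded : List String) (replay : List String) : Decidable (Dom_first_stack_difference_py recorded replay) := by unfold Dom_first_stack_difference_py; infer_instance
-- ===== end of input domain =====

-- B finds the mismatch index by binary search over the monotone predicate
-- "the length-m prefixes are equal" (alternative algorithm), instead of A's
-- linear index scan plus a separate length-difference tail branch.


-- ===== PORT A =====
-- the 'for index in range(limit)' loop; the [] case is the code after the loop
def pvAScan (recorded : List String) (replay : List String) (limit : Int) :
    List Int → Option Int × Option String × Option String
  | [] =>
      if (recorded.length : Int) ≠ (replay.length : Int) then
        (some limit, PySem.List.pyGet? recorded limit, PySem.List.pyGet? replay limit)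
      else (none, none, none)
  | i :: rest =>
      if PySem.List.pyGetD recorded i "" ≠ PySem.List.pyGetD replay i "" then
        (some i, some (PySem.List.pyGetD recorded i ""), some (PySem.List.pyGetD replay i ""))
      else pvAScan recorded replay limit rest

def first_stack_difference_py (recorded : List String) (replay : List String) : Option Int × Option String × Option String :=
  let limit : Int := min (recorded.length : Int) (replay.length : Int)
  pvAScan recorded replay limit (PySem.List.pyRange 0 limit 1)

-- ===== PORT B =====
-- midpoint bounds used by the binary search's termination proof
theorem pvMid_bounds (lo hi : Int) (h : lo < hi) :
    lo + 1 ≤ PySem.Int.floordiv (lo + hi + 1) 2 ∧ PySem.Int.floordiv (lo + hi + 1) 2 ≤ hi := by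
  have := PySem.Int.floordiv_two_mid_bounds (lo := lo + 1) (hi := hi) (by omega)
  constructor
  · have h1 := this.1
    calc lo + 1 ≤ PySem.Int.floordiv (lo + 1 + hi) 2 := h1
      _ = PySem.Int.floordiv (lo + hi + 1) 2 := by ring_nf
  · have h2 := this.2
    calc PySem.Int.floordiv (lo + hi + 1) 2 = PySem.Int.floordiv (lo + 1 + hi) 2 := by ring_nf
      _ ≤ hi := h2

-- Source B's 'while lo < hi' binary-search loop
def pvBSearch (recorded : List String) (replay : List String) (lo hi : Int) : Int :=
  if h : lo < hi then
    let mid := PySem.Int.floordiv (lo + hi + 1) 2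
    if PySem.List.slice recorded none (some mid) = PySem.List.slice replay none (some mid) then
      pvBSearch recorded replay mid hi
    else
      pvBSearch recorded replay lo (mid - 1)
  else lo
termination_by (hi - lo).toNat
decreasing_by
  · have := pvMid_bounds lo hi h; omega
  · have := pvMid_bounds lo hi h; omega

def first_stack_difference_py_alt (recorded : List String) (replay : List String) : Option Int × Option String × Option String :=
  let k := pvBSearch recorded replay 0 (min (recorded.length : Int) (replay.length : Int))
  if k = (recorded.length : Int) ∧ k = (replay.length : Int) then (none, none, none)
  else
    (some k,
     if k < (recorded.length : Int) then some (PySem.List.pyGetD recorded k "") else none,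
     if k < (replay.length : Int) then some (PySem.List.pyGetD replay k "") else none)

-- ===== PRECONDITION & SPEC =====
def Spec_first_stack_difference_py (recorded : List String) (replay : List String) (out : Option Int × Option String × Option String) : Prop := out = first_stack_difference_py_alt recorded replay
instance (recorded : List String) (replay : List String) (out : Option Int × Option String × Option String) : Decidable (Spec_first_stack_difference_py recorded replay out) := by unfold Spec_first_stack_difference_py; infer_instance

-- ===== CLAIM (what is proved, stated in full; the proofs are below) =====
def Claim_equal_first_stack_difference_py : Prop := ∀ (recorded : List String) (replay : List String), Dom_first_stack_difference_py recorded replay → Spec_first_stack_difference_py recorded replay (first_stack_difference_py recorded replay)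

-- ===== LEMMAS AND PROOFS =====

-- proof-side helpers: the longest common prefix length, the common output shape,
-- and a structural simultaneous walk that both ports are reduced to
def pvPrefixLen : List String → List String → Nat
  | r :: rs, p :: ps => if r = p then pvPrefixLen rs ps + 1 else 0
  | _, _ => 0

def pvOut (r p : List String) (i : Int) : Option Int × Option String × Option String :=
  let k := pvPrefixLen r p
  if k = r.length ∧ k = p.length then (none, none, none)
  else (some (i + k),
        if k < r.length then some (r.getD k "") else none,
        if k < p.length then some (p.getD k "") else none)

def pvBWalk : List String → List String → Int → Option Int × Option String × Option String
  | [], [], _ => (none, none, none)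
  | r :: _, [], index => (some index, some r, none)
  | [], p :: _, index => (some index, none, some p)
  | r :: rs, p :: ps, index =>
      if r ≠ p then (some index, some r, some p) else pvBWalk rs ps (index + 1)

theorem pvPrefixLen_le (r p : List String) : pvPrefixLen r p ≤ min r.length p.length := by
  induction r generalizing p with
  | nil => simp [pvPrefixLen]
  | cons a rs ih =>
      cases p with
      | nil => simp [pvPrefixLen]
      | cons b ps =>
          by_cases hab : a = b
          · have := ih ps
            simp [pvPrefixLen, hab]; omega
          · simp [pvPrefixLen, hab]

theorem pvTake_eq_iff (r p : List String) (m : Nat) (h1 : m ≤ r.length) (h2 : m ≤ p.length) :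
    r.take m = p.take m ↔ m ≤ pvPrefixLen r p := by
  induction m generalizing r p with
  | zero => simp
  | succ n ih =>
      cases r with
      | nil => simp at h1
      | cons a rs =>
        cases p with
        | nil => simp at h2
        | cons b ps =>
            simp only [List.take_succ_cons, List.cons.injEq, pvPrefixLen]
            by_cases hab : a = b
            · rw [if_pos hab]
              have := ih rs ps (by simpa using h1) (by simpa using h2)
              constructor
              · intro hpair; have := this.mp hpair.2; omega
              · intro hle; exact ⟨hab, this.mpr (by omega)⟩
            · rw [if_neg hab]
              constructor
              · intro hpair; exact absurd hpair.1 hab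
              · intro hle; omega

-- the binary search computes the longest-common-prefix length
theorem pvBSearch_eq (recorded replay : List String) (lo hi : Int)
    (h0 : 0 ≤ lo) (hlo : lo ≤ (pvPrefixLen recorded replay : Int))
    (hhi : (pvPrefixLen recorded replay : Int) ≤ hi)
    (hle : hi ≤ min (recorded.length : Int) (replay.length : Int)) :
    pvBSearch recorded replay lo hi = (pvPrefixLen recorded replay : Int) := by
  obtain ⟨n, hn⟩ : ∃ n, (hi - lo).toNat = n := ⟨_, rfl⟩
  induction n using Nat.strong_induction_on generalizing lo hi with
  | _ n ih =>
    rw [pvBSearch]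
    by_cases h : lo < hi
    · rw [dif_pos h]
      have hmid := pvMid_bounds lo hi h
      set mid := PySem.Int.floordiv (lo + hi + 1) 2 with hmiddef
      have hmid0 : 0 ≤ mid := by omega
      have hmidr : mid.toNat ≤ recorded.length := by omega
      have hmidp : mid.toNat ≤ replay.length := by omega
      have hsl1 : PySem.List.slice recorded none (some mid) = recorded.take mid.toNat :=
        PySem.List.slice_to (xs := recorded) (b := mid) hmid0
      have hsl2 : PySem.List.slice replay none (some mid) = replay.take mid.toNat :=
        PySem.List.slice_to (xs := replay) (b := mid) hmid0
      have hiff := pvTake_eq_iff recorded replay mid.toNat hmidr hmidp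
      by_cases heq : PySem.List.slice recorded none (some mid) = PySem.List.slice replay none (some mid)
      · rw [if_pos heq]
        have hk : mid ≤ (pvPrefixLen recorded replay : Int) := by
          have := hiff.mp (by rw [hsl1, hsl2] at heq; exact heq)
          omega
        exact ih (hi - mid).toNat (by omega) mid hi (by omega) hk hhi hle rfl
      · rw [if_neg heq]
        have hk : (pvPrefixLen recorded replay : Int) ≤ mid - 1 := by
          by_contra hc
          exact heq (by rw [hsl1, hsl2]; exact hiff.mpr (by omega))
        exact ih (mid - 1 - lo).toNat (by omega) lo (mid - 1) h0 hlo hk (by omega) rfl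
    · rw [dif_neg h]; omega

theorem pvOut_cons_eq (a : String) (rs ps : List String) (i : Int) :
    pvOut rs ps (i + 1) = pvOut (a :: rs) (a :: ps) i := by
  have hpl : pvPrefixLen (a :: rs) (a :: ps) = pvPrefixLen rs ps + 1 := by
    simp [pvPrefixLen]
  unfold pvOut
  rw [hpl]
  simp only [List.length_cons, List.getD_cons_succ]
  split_ifs <;>
    first
      | rfl
      | (exfalso; omega)
      | (refine Prod.ext ?_ (Prod.ext ?_ ?_) <;> simp only <;>
          first
            | rfl
            | (exfalso; omega)
            | (congr 1; push_cast; ring))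

-- the structural walk produces the common output shape
theorem pvBWalk_eq_out (r p : List String) (i : Int) : pvBWalk r p i = pvOut r p i := by
  induction r generalizing p i with
  | nil =>
      cases p with
      | nil => simp [pvBWalk, pvOut, pvPrefixLen]
      | cons b ps => simp [pvBWalk, pvOut, pvPrefixLen]
  | cons a rs ih =>
      cases p with
      | nil => simp [pvBWalk, pvOut, pvPrefixLen]
      | cons b ps =>
          by_cases hab : a = b
          · subst hab
            simp only [pvBWalk, ne_eq, not_true_eq_false, ite_false]
            rw [ih ps (i + 1), pvOut_cons_eq]
          · simp [pvBWalk, pvOut, pvPrefixLen, hab]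

-- A's scan from index i onward equals the structural walk on the length-i suffixes.
theorem pvScan_eq_walk (recorded replay : List String) (i : Nat)
    (hi : i ≤ min recorded.length replay.length) :
    pvAScan recorded replay (min (recorded.length : Int) (replay.length : Int))
        (PySem.List.pyRange (i : Int) (min (recorded.length : Int) (replay.length : Int)) 1)
      = pvBWalk (recorded.drop i) (replay.drop i) (i : Int) := by
  obtain ⟨n, hn⟩ : ∃ n, min recorded.length replay.length - i = n := ⟨_, rfl⟩
  induction n generalizing i with
  | zero =>
      have hiL : i = min recorded.length replay.length := by omega
      have hnil : PySem.List.pyRange (i : Int) (min (recorded.length : Int) (replay.length : Int)) 1 = [] := by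
        apply PySem.List.pyRange_one_eq_nil
        rw [← Nat.cast_min]; exact_mod_cast hiL.ge
      rw [hnil]
      unfold pvAScan
      by_cases hlen : recorded.length = replay.length
      · have h1 : recorded.drop i = [] := by
          apply List.drop_eq_nil_of_le; omega
        have h2 : replay.drop i = [] := by
          apply List.drop_eq_nil_of_le; omega
        rw [h1, h2]
        simp [pvBWalk, hlen]
      · rcases Nat.lt_or_ge recorded.length replay.length with hlt | hge
        · have h1 : recorded.drop i = [] := by apply List.drop_eq_nil_of_le; omega
          have hi2 : i < replay.length := by omega
          have h2 : replay.drop i = replay[i] :: replay.drop (i + 1) :=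
            List.drop_eq_getElem_cons hi2
          rw [h1, h2]
          have hA : PySem.List.pyGet? recorded (min (recorded.length : Int) (replay.length : Int)) = none := by
            rw [← Nat.cast_min, PySem.List.pyGet?_natCast]
            simp; omega
          have hB : PySem.List.pyGet? replay (min (recorded.length : Int) (replay.length : Int)) = some replay[i] := by
            rw [← Nat.cast_min, PySem.List.pyGet?_natCast, ← hiL]
            exact List.getElem?_eq_getElem hi2
          simp only [pvBWalk]
          rw [if_pos (by exact_mod_cast hlen), hA, hB, ← Nat.cast_min, ← hiL]
        · have hlt : replay.length < recorded.length := by omega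
          have h2 : replay.drop i = [] := by apply List.drop_eq_nil_of_le; omega
          have hi1 : i < recorded.length := by omega
          have h1 : recorded.drop i = recorded[i] :: recorded.drop (i + 1) :=
            List.drop_eq_getElem_cons hi1
          rw [h1, h2]
          have hA : PySem.List.pyGet? recorded (min (recorded.length : Int) (replay.length : Int)) = some recorded[i] := by
            rw [← Nat.cast_min, PySem.List.pyGet?_natCast, ← hiL]
            exact List.getElem?_eq_getElem hi1
          have hB : PySem.List.pyGet? replay (min (recorded.length : Int) (replay.length : Int)) = none := by
            rw [← Nat.cast_min, PySem.List.pyGet?_natCast]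
            simp; omega
          simp only [pvBWalk]
          rw [if_pos (by exact_mod_cast hlen), hA, hB, ← Nat.cast_min, ← hiL]
  | succ n ih =>
      have hiL : i < min recorded.length replay.length := by omega
      have hcons : PySem.List.pyRange (i : Int) (min (recorded.length : Int) (replay.length : Int)) 1
          = (i : Int) :: PySem.List.pyRange ((i : Int) + 1) (min (recorded.length : Int) (replay.length : Int)) 1 := by
        apply PySem.List.pyRange_one_cons
        rw [← Nat.cast_min]; exact_mod_cast hiL
      have hi1 : i < recorded.length := by omega
      have hi2 : i < replay.length := by omega
      have h1 : recorded.drop i = recorded[i] :: recorded.drop (i + 1) :=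
        List.drop_eq_getElem_cons hi1
      have h2 : replay.drop i = replay[i] :: replay.drop (i + 1) :=
        List.drop_eq_getElem_cons hi2
      rw [hcons, h1, h2]
      simp only [pvAScan, pvBWalk, PySem.List.pyGetD_natCast,
        List.getD_eq_getElem?_getD, List.getElem?_eq_getElem hi1,
        List.getElem?_eq_getElem hi2, Option.getD_some]
      by_cases hne : recorded[i] ≠ replay[i]
      · simp [hne]
      · rw [if_neg hne, if_neg hne]
        have := ih (i + 1) (by omega) (by omega)
        rw [Nat.cast_add, Nat.cast_one] at this
        exact this

-- B's wrapper around the binary search also produces the common output shape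
theorem pvAlt_eq_out (recorded replay : List String) :
    first_stack_difference_py_alt recorded replay = pvOut recorded replay 0 := by
  have hle := pvPrefixLen_le recorded replay
  have hk : pvBSearch recorded replay 0 (min (recorded.length : Int) (replay.length : Int))
      = (pvPrefixLen recorded replay : Int) := by
    apply pvBSearch_eq <;> [skip; exact_mod_cast Nat.zero_le _; skip; omega] <;> push_cast <;> omega
  unfold first_stack_difference_py_alt pvOut
  rw [hk]
  by_cases hend : pvPrefixLen recorded replay = recorded.length ∧ pvPrefixLen recorded replay = replay.length
  · rw [if_pos ⟨by exact_mod_cast hend.1, by exact_mod_cast hend.2⟩, if_pos hend]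
  · rw [if_neg (fun h => hend ⟨by exact_mod_cast h.1, by exact_mod_cast h.2⟩), if_neg hend]
    refine Prod.ext (by simp) (Prod.ext ?_ ?_) <;> simp only
    · by_cases h1 : pvPrefixLen recorded replay < recorded.length
      · rw [if_pos (by exact_mod_cast h1), if_pos h1, PySem.List.pyGetD_natCast]
      · rw [if_neg (by exact_mod_cast h1), if_neg h1]
    · by_cases h2 : pvPrefixLen recorded replay < replay.length
      · rw [if_pos (by exact_mod_cast h2), if_pos h2, PySem.List.pyGetD_natCast]
      · rw [if_neg (by exact_mod_cast h2), if_neg h2]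

-- ===== VERDICT (by name: the statement is the Claim_ definition above) =====
theorem first_stack_difference_py_spec : Claim_equal_first_stack_difference_py := by
  intro recorded replay _
  unfold Spec_first_stack_difference_py first_stack_difference_py
  rw [pvAlt_eq_out]
  have := pvScan_eq_walk recorded replay 0 (Nat.zero_le _)
  simp only [Nat.cast_zero, List.drop_zero] at this
  rw [this, pvBWalk_eq_out]
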